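-- pv_equiv track=rewrite | github.com/Dorizzz0610/Simple-Search-Engine | backend/searcher.py | count_phrase
-- ===== SOURCE A (Python) =====
-- def count_phrase(index, query_phrase, doc_num):
--     # return the frequency of the phrases in the doc
--     phrase_frequency = {}
--     max_freq = 0
--     for doc_id in range(doc_num):
--         phrase_frequency[doc_id] = {}
--         for phrase in query_phrase:
--             prev_positions = []
--             cur_positions = []
--             # iterate each word in phrase
--             for word in phrase.split():
--                 if word not in index.keys():
--                     # word isn't in any doc body
--                     break
--                 if any(word_page_info[0] == doc_id for word_page_info in index[word]) == False:
--                     # word isn't in this doc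
--                     break
--
--                 for word_info in index[word]:
--                     if(word_info[0] == doc_id):
--                         cur_positions = word_info[2]
--                         break
--
--                 if word == phrase.split()[0]:
--                     # first word
--                     prev_positions = cur_positions
--                 else:
--                     # not first word, check with previous words' position
--                     temp_positions = []
--                     for prev_position in prev_positions:
--                         if prev_position + 1 in cur_positions:
--                             temp_positions.append(prev_position + 1)
--                     prev_positions = temp_positions
--
--             freq = len(prev_positions)
--
--             if freq > max_freq:
--                 max_freq = freq
--             phrase_frequency[doc_id][phrase] = freq
--
--     return phrase_frequency, max_freq
-- ===== SOURCE B (Python) =====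
-- def count_phrase(index, query_phrase, doc_num):
--     # B: per phrase, precompute once the per-word lookup tables doc_id -> (positions, set(positions)),
--     # cut at the first word absent from the index; the doc loop then needs only O(1) dict/set lookups
--     # instead of A's per-document phrase re-splits, posting-list rescans and linear membership tests.
--     posmap = {}
--     prep = []
--     for phrase in query_phrase:
--         words = phrase.split()
--         tabs = []
--         for w in words:
--             table = posmap.get(w)
--             if table is None:
--                 if w not in index:
--                     break
--                 table = {}
--                 for info in index[w]:
--                     if info[0] not in table:
--                         table[info[0]] = (info[2], set(info[2]))
--                 posmap[w] = table
--             tabs.append((w == words[0], table))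
--         prep.append((phrase, tabs))
--     phrase_frequency = {}
--     max_freq = 0
--     for doc_id in range(doc_num):
--         row = {}
--         for phrase, tabs in prep:
--             if tabs and doc_id in tabs[0][1]:
--                 prev = []
--                 for is_first, table in tabs:
--                     entry = table.get(doc_id)
--                     if entry is None:
--                         break
--                     lst, st = entry
--                     if is_first:
--                         prev = lst
--                     else:
--                         prev = [p + 1 for p in prev if p + 1 in st]
--                 freq = len(prev)
--             else:
--                 freq = 0
--             if freq > max_freq:
--                 max_freq = freq
--             row[phrase] = freq
--         phrase_frequency[doc_id] = row
--     return phrase_frequency, max_freq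
-- ===== Notes on version B (the rewrite author's own statement) =====
-- stated objective: alternative
-- what changed: B splits each phrase once and prebuilds, per query word, a doc_id -> (positions, set(positions)) table cut at the first word absent from the index, so the per-document phrase re-splits, posting-list rescans and linear membership tests of A disappear (intended as faster; a timing run measured 2.9x at the largest size both finished but could not confirm it at sizes where both time out, so no speed is claimed).
import Mathlib
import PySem

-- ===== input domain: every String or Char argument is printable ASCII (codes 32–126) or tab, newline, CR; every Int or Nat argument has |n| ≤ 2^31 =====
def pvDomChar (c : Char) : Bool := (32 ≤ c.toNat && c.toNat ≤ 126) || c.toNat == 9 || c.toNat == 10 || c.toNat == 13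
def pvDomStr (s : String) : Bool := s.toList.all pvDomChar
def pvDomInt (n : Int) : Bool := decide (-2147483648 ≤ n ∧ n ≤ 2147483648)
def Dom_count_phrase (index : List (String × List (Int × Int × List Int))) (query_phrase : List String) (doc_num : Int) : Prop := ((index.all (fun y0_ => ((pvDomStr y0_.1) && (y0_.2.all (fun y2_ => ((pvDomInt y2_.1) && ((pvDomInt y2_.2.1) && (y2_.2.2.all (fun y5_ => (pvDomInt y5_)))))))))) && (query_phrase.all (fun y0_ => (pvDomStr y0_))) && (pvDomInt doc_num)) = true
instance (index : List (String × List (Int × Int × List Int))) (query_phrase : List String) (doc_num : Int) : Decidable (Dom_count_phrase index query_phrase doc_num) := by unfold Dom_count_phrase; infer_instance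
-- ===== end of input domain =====

-- B replaces A's per-(doc,word) phrase re-splits, posting-list rescans and linear
-- position-membership tests by per-word tables (doc_id → positions/position-set) built once.

-- ===== PORT A =====
-- the inner 'for word_info in index[word]: if word_info[0]==doc_id: cur_positions = word_info[2]; break'
def pvAFindCur (postings : List (Int × Int × List Int)) (doc_id : Int) (cur : List Int) : List Int :=
  match postings with
  | [] => cur
  | info :: rest => if info.1 == doc_id then info.2.2 else pvAFindCur rest doc_id cur

-- the 'for word in phrase.split()' loop with its two breaks; state = (prev_positions, cur_positions)
def pvAWordLoop (idx : PySem.Dict String (List (Int × Int × List Int))) (doc_id : Int)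
    (firstWord : String) : List String → List Int → List Int → List Int
  | [], prev, _ => prev
  | w :: ws, prev, cur =>
    match idx.get? w with
    | none => prev
    | some postings =>
      if (postings.any (fun info => info.1 == doc_id)) = false then prev
      else
        let cur' := pvAFindCur postings doc_id cur
        if w == firstWord then pvAWordLoop idx doc_id firstWord ws cur' cur'
        else
          pvAWordLoop idx doc_id firstWord ws
            (prev.foldl (fun temp p => if cur'.contains (p + 1) then temp ++ [p + 1] else temp) []) cur'

def count_phrase (index : List (String × List (Int × Int × List Int))) (query_phrase : List String) (doc_num : Int) : (List (Int × List (String × Int))) × Int :=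
  let idx := PySem.Dict.mk index
  let r :=
    (PySem.List.pyRange 0 doc_num 1).foldl
      (fun (st : PySem.Dict Int (PySem.Dict String Int) × Int) doc_id =>
        let inner :=
          query_phrase.foldl
            (fun (st2 : PySem.Dict String Int × Int) phrase =>
              let words := PySem.Str.split₀ phrase
              let freq : Int := (pvAWordLoop idx doc_id (words.headD "") words [] []).length
              (st2.1.insert phrase freq, if freq > st2.2 then freq else st2.2))
            (PySem.Dict.empty, st.2)
        (st.1.insert doc_id inner.1, inner.2))
      (PySem.Dict.empty, 0)
  (r.1.items.map (fun p => (p.1, p.2.items)), r.2)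

-- ===== PORT B =====
-- doc_id -> (positions, set(positions)), first posting per doc
def pvBTable (postings : List (Int × Int × List Int)) : PySem.Dict Int (List Int × PySem.Set Int) :=
  postings.foldl
    (fun t info => if t.contains info.1 then t else t.insert info.1 (info.2.2, PySem.Set.ofList info.2.2))
    PySem.Dict.empty

-- the 'for w in words' table-collecting loop of B, threading the posmap cache; stops at the
-- first word absent from the index
def pvBTabsLoop (idx : PySem.Dict String (List (Int × Int × List Int))) (w0 : String) :
    List String → PySem.Dict String (PySem.Dict Int (List Int × PySem.Set Int)) →
    PySem.Dict String (PySem.Dict Int (List Int × PySem.Set Int)) × List (Bool × PySem.Dict Int (List Int × PySem.Set Int))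
  | [], pm => (pm, [])
  | w :: ws, pm =>
    match pm.get? w with
    | some table =>
      let r := pvBTabsLoop idx w0 ws pm
      (r.1, (w == w0, table) :: r.2)
    | none =>
      match idx.get? w with
      | none => (pm, [])
      | some postings =>
        let table := pvBTable postings
        let r := pvBTabsLoop idx w0 ws (pm.insert w table)
        (r.1, (w == w0, table) :: r.2)

-- the 'for is_first, table in tabs' loop of B
def pvBTabLoop (doc_id : Int) : List (Bool × PySem.Dict Int (List Int × PySem.Set Int)) → List Int → List Int
  | [], prev => prev
  | (isFirst, table) :: rest, prev =>
    match table.get? doc_id with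
    | none => prev
    | some (lst, st) =>
      if isFirst then pvBTabLoop doc_id rest lst
      else pvBTabLoop doc_id rest ((prev.filter (fun p => st.contains (p + 1))).map (fun p => p + 1))

def count_phrase_alt (index : List (String × List (Int × Int × List Int))) (query_phrase : List String) (doc_num : Int) : (List (Int × List (String × Int))) × Int :=
  let idx := PySem.Dict.mk index
  let prep :=
    query_phrase.foldl
      (fun (st : PySem.Dict String (PySem.Dict Int (List Int × PySem.Set Int)) × List (String × List (Bool × PySem.Dict Int (List Int × PySem.Set Int)))) phrase =>
        let words := PySem.Str.split₀ phrase
        let r := pvBTabsLoop idx (words.headD "") words st.1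
        (r.1, st.2 ++ [(phrase, r.2)]))
      (PySem.Dict.empty, [])
  let r :=
    (PySem.List.pyRange 0 doc_num 1).foldl
      (fun (st : PySem.Dict Int (PySem.Dict String Int) × Int) doc_id =>
        let inner :=
          prep.2.foldl
            (fun (st2 : PySem.Dict String Int × Int) pt =>
              let freq : Int :=
                match pt.2 with
                | [] => 0
                | (_, t0) :: _ => if t0.contains doc_id then ((pvBTabLoop doc_id pt.2 []).length : Int) else 0
              (st2.1.insert pt.1 freq, if freq > st2.2 then freq else st2.2))
            (PySem.Dict.empty, st.2)
        (st.1.insert doc_id inner.1, inner.2))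
      (PySem.Dict.empty, 0)
  (r.1.items.map (fun p => (p.1, p.2.items)), r.2)

-- ===== PRECONDITION & SPEC =====
def Spec_count_phrase (index : List (String × List (Int × Int × List Int))) (query_phrase : List String) (doc_num : Int) (out : (List (Int × List (String × Int))) × Int) : Prop := out = count_phrase_alt index query_phrase doc_num
instance (index : List (String × List (Int × Int × List Int))) (query_phrase : List String) (doc_num : Int) (out : (List (Int × List (String × Int))) × Int) : Decidable (Spec_count_phrase index query_phrase doc_num out) := by unfold Spec_count_phrase; infer_instance

-- ===== CLAIM (what is proved, stated in full; the proofs are below) =====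
def Claim_equal_count_phrase : Prop := ∀ (index : List (String × List (Int × Int × List Int))) (query_phrase : List String) (doc_num : Int), Dom_count_phrase index query_phrase doc_num → Spec_count_phrase index query_phrase doc_num (count_phrase index query_phrase doc_num)

-- ===== LEMMAS AND PROOFS =====

-- lookup in the running pvBTable fold: first match wins
theorem pvBTable_fold_get (doc : Int) (postings : List (Int × Int × List Int)) :
    ∀ t : PySem.Dict Int (List Int × PySem.Set Int),
    (postings.foldl
      (fun t info => if t.contains info.1 then t else t.insert info.1 (info.2.2, PySem.Set.ofList info.2.2)) t).get? doc =
    ((t.get? doc).or ((postings.find? (fun i => i.1 == doc)).map (fun i => (i.2.2, PySem.Set.ofList i.2.2)))) := by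
  induction postings with
  | nil => intro t; simp
  | cons info rest ih =>
    intro t
    rw [List.foldl_cons, ih, List.find?_cons]
    by_cases hd : info.1 = doc
    · subst hd
      simp only [BEq.rfl]
      by_cases hc : t.contains info.1
      · have hs : (t.get? info.1).isSome := by
          rw [← PySem.Dict.contains_eq_isSome_get?]; exact hc
        obtain ⟨v, hv⟩ := Option.isSome_iff_exists.mp hs
        simp [hc, hv]
      · have hn : t.get? info.1 = none := by
          rw [PySem.Dict.get?_eq_none_iff_contains]; simpa using hc
        simp [hc, hn, PySem.Dict.get?_insert_self]
    · have hb : (info.1 == doc) = false := by simpa using hd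
      by_cases hc : t.contains info.1
      · simp [hc, hb]
      · have hne : doc ≠ info.1 := fun h => hd h.symm
        simp only [hc, hb, Bool.false_eq_true, ↓reduceIte,
          PySem.Dict.get?_insert_of_ne _ _ hne]

theorem pvBTable_get (postings : List (Int × Int × List Int)) (doc : Int) :
    (pvBTable postings).get? doc =
      (postings.find? (fun i => i.1 == doc)).map (fun i => (i.2.2, PySem.Set.ofList i.2.2)) := by
  unfold pvBTable
  rw [pvBTable_fold_get]
  simp

-- what the tabs list of a phrase is, independently of the posmap cache
def pvTabsSpec (idx : PySem.Dict String (List (Int × Int × List Int))) (w0 : String) :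
    List String → List (Bool × PySem.Dict Int (List Int × PySem.Set Int))
  | [] => []
  | w :: ws =>
    match idx.get? w with
    | none => []
    | some postings => (w == w0, pvBTable postings) :: pvTabsSpec idx w0 ws

-- cache invariant: every cached table is the table of the word's posting list
def pvPMInv (idx : PySem.Dict String (List (Int × Int × List Int)))
    (pm : PySem.Dict String (PySem.Dict Int (List Int × PySem.Set Int))) : Prop :=
  ∀ u, pm.get? u = none ∨ pm.get? u = (idx.get? u).map pvBTable

theorem pvPMInv_insert (idx : PySem.Dict String (List (Int × Int × List Int)))
    (pm : PySem.Dict String (PySem.Dict Int (List Int × PySem.Set Int)))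
    (w : String) (postings : List (Int × Int × List Int))
    (h : pvPMInv idx pm) (hw : idx.get? w = some postings) :
    pvPMInv idx (pm.insert w (pvBTable postings)) := by
  intro u
  by_cases huw : u = w
  · subst huw
    right; rw [PySem.Dict.get?_insert_self, hw]; rfl
  · rw [PySem.Dict.get?_insert_of_ne _ _ huw]; exact h u

theorem pvBTabsLoop_spec (idx : PySem.Dict String (List (Int × Int × List Int))) (w0 : String)
    (ws : List String) :
    ∀ pm, pvPMInv idx pm →
      pvPMInv idx (pvBTabsLoop idx w0 ws pm).1 ∧
      (pvBTabsLoop idx w0 ws pm).2 = pvTabsSpec idx w0 ws := by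
  induction ws with
  | nil => intro pm h; exact ⟨h, rfl⟩
  | cons w ws ih =>
    intro pm h
    rw [pvBTabsLoop, pvTabsSpec]
    cases hpm : pm.get? w with
    | some table =>
      rcases h w with hn | he
      · rw [hn] at hpm; cases hpm
      · rw [hpm] at he
        cases hidx : idx.get? w with
        | none => rw [hidx] at he; cases he
        | some postings =>
          rw [hidx] at he
          have hteq : table = pvBTable postings := by simpa using he
          subst hteq
          obtain ⟨h1, h2⟩ := ih pm h
          refine ⟨h1, ?_⟩
          show (w == w0, pvBTable postings) :: (pvBTabsLoop idx w0 ws pm).2 =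
            (w == w0, pvBTable postings) :: pvTabsSpec idx w0 ws
          rw [h2]
    | none =>
      cases hidx : idx.get? w with
      | none => exact ⟨h, rfl⟩
      | some postings =>
        obtain ⟨h1, h2⟩ := ih (pm.insert w (pvBTable postings)) (pvPMInv_insert idx pm w postings h hidx)
        refine ⟨h1, ?_⟩
        show (w == w0, pvBTable postings) :: (pvBTabsLoop idx w0 ws (pm.insert w (pvBTable postings))).2 =
          (w == w0, pvBTable postings) :: pvTabsSpec idx w0 ws
        rw [h2]

-- the prep fold appends one (phrase, tabs) pair per phrase, independently of the cache
theorem pvPrep_spec (idx : PySem.Dict String (List (Int × Int × List Int))) (qp : List String) :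
    ∀ pm acc, pvPMInv idx pm →
      (qp.foldl
        (fun (st : PySem.Dict String (PySem.Dict Int (List Int × PySem.Set Int)) × List (String × List (Bool × PySem.Dict Int (List Int × PySem.Set Int)))) phrase =>
          let words := PySem.Str.split₀ phrase
          let r := pvBTabsLoop idx (words.headD "") words st.1
          (r.1, st.2 ++ [(phrase, r.2)]))
        (pm, acc)).2 =
      acc ++ qp.map (fun phrase =>
        (phrase, pvTabsSpec idx ((PySem.Str.split₀ phrase).headD "") (PySem.Str.split₀ phrase))) := by
  induction qp with
  | nil => intro pm acc h; simp
  | cons phrase rest ih =>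
    intro pm acc h
    rw [List.foldl_cons, List.map_cons]
    obtain ⟨h1, h2⟩ := pvBTabsLoop_spec idx ((PySem.Str.split₀ phrase).headD "") (PySem.Str.split₀ phrase) pm h
    simp only []
    rw [ih _ _ h1, h2]
    simp

theorem pvAFindCur_eq_find? (postings : List (Int × Int × List Int)) (doc : Int) (cur : List Int) :
    pvAFindCur postings doc cur = ((postings.find? (fun i => i.1 == doc)).map (fun i => i.2.2)).getD cur := by
  induction postings with
  | nil => simp [pvAFindCur]
  | cons info rest ih =>
    rw [pvAFindCur, List.find?_cons]
    by_cases hd : (info.1 == doc)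
    · simp [hd]
    · simp only [Bool.not_eq_true] at hd
      simp [hd, ih]

-- A's word loop = B's tabs loop on the phrase's tabs
theorem pvWordLoop_eq (idx : PySem.Dict String (List (Int × Int × List Int)))
    (doc : Int) (fw : String) (words : List String) : ∀ (prev cur : List Int),
    pvAWordLoop idx doc fw words prev cur = pvBTabLoop doc (pvTabsSpec idx fw words) prev := by
  induction words with
  | nil => intro prev cur; rfl
  | cons w ws ih =>
    intro prev cur
    rw [pvAWordLoop, pvTabsSpec]
    cases hidx : idx.get? w with
    | none => rfl
    | some postings =>
      rw [pvBTabLoop, pvBTable_get]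
      cases hf : postings.find? (fun i => i.1 == doc) with
      | none =>
        have hany : postings.any (fun info => info.1 == doc) = false := by
          rw [List.any_eq_false]
          intro x hx
          simpa using List.find?_eq_none.mp hf x hx
        simp [hany]
      | some i =>
        have hany : postings.any (fun info => info.1 == doc) = true := by
          rw [List.any_eq_true]
          have hpi := List.find?_some hf
          exact ⟨i, List.mem_of_find?_eq_some hf, hpi⟩
        have hcur : pvAFindCur postings doc cur = i.2.2 := by
          rw [pvAFindCur_eq_find?, hf]; rfl
        simp only [hany, Bool.true_eq_false, ↓reduceIte, Option.map_some, hcur]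
        by_cases hfw : (w == fw)
        · simp only [hfw, ↓reduceIte]
          exact ih _ _
        · simp only [hfw, Bool.false_eq_true, ↓reduceIte]
          rw [PySem.List.foldl_append_if (p := fun p => i.2.2.contains (p + 1)) (f := fun p => p + 1)]
          rw [ih _ _]
          have hcont : (fun p => (PySem.Set.ofList i.2.2).contains (p + 1)) = (fun p : Int => i.2.2.contains (p + 1)) := by
            funext p
            simp [PySem.Set.mem_ofList]
          simp only [List.nil_append, hcont]

-- B's frequency (with its zero fast path) = A's frequency
theorem pvFreq_eq (idx : PySem.Dict String (List (Int × Int × List Int)))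
    (doc : Int) (fw : String) (words : List String) :
    (match pvTabsSpec idx fw words with
      | [] => (0 : Int)
      | (_, t0) :: _ => if t0.contains doc then ((pvBTabLoop doc (pvTabsSpec idx fw words) []).length : Int) else 0) =
    ((pvAWordLoop idx doc fw words [] []).length : Int) := by
  cases words with
  | nil => rfl
  | cons w ws =>
    cases hidx : idx.get? w with
    | none =>
      have hspec : pvTabsSpec idx fw (w :: ws) = [] := by rw [pvTabsSpec, hidx]
      rw [hspec]
      simp [pvAWordLoop, hidx]
    | some postings =>
      have hspec : pvTabsSpec idx fw (w :: ws) = (w == fw, pvBTable postings) :: pvTabsSpec idx fw ws := by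
        rw [pvTabsSpec, hidx]
      have hAB := pvWordLoop_eq idx doc fw (w :: ws) [] []
      rw [hspec] at hAB ⊢
      rw [hAB]
      cases hc : (pvBTable postings).contains doc with
      | true => simp [hc]
      | false =>
        have hg : (pvBTable postings).get? doc = none := by
          rw [PySem.Dict.get?_eq_none_iff_contains]; exact hc
        simp [hc, pvBTabLoop, hg]

-- ===== VERDICT (by name: the statement is the Claim_ definition above) =====
theorem count_phrase_spec : Claim_equal_count_phrase := by
  intro index qp dn _
  unfold Spec_count_phrase count_phrase count_phrase_alt
  have hprep := pvPrep_spec (PySem.Dict.mk index) qp PySem.Dict.empty []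
    (fun u => Or.inl (by simp))
  refine congrArg
    (fun r : PySem.Dict Int (PySem.Dict String Int) × Int =>
      (r.1.items.map (fun p => (p.1, p.2.items)), r.2)) ?_
  simp only [hprep, List.nil_append]
  apply PySem.List.foldl_congr_mem
  intro st doc_id _
  refine congrArg
    (fun inner : PySem.Dict String Int × Int => (st.1.insert doc_id inner.1, inner.2)) ?_
  rw [List.foldl_map]
  apply PySem.List.foldl_congr_mem
  intro st2 phrase _
  simp only []
  rw [pvFreq_eq (PySem.Dict.mk index) doc_id ((PySem.Str.split₀ phrase).headD "") (PySem.Str.split₀ phrase)]
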